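-- pv_equiv track=rewrite | github.com/cicada-solvers/optimisticninja_cicada3301 | 2012/03.subreddit/08.midi/scripts/midinotes.py | notesToSingleLetters
-- ===== SOURCE A (Python) =====
-- def notesToSingleLetters(msg):
--     result = ''
--     letters = list('abcdefghijklmnopqrstuvwxyz')
--     dict = {}
--     for line in msg.splitlines():
--         if line in dict:
--             result += dict[line]
--         else:
--             letter = letters.pop(0)
--             result += letter
--             dict[line] = letter
--     return result
-- ===== SOURCE B (Python) =====
-- def notesToSingleLetters(msg):
--     alphabet = 'abcdefghijklmnopqrstuvwxyz'
--     mapping = {}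
--     for line in msg.splitlines():
--         if line not in mapping:
--             mapping[line] = alphabet[len(mapping)]
--     return ''.join(mapping[line] for line in msg.splitlines())
-- ===== Notes on version B (the rewrite author's own statement) =====
-- stated objective: simpler
-- what changed: Replaces the single interleaved loop threading a mutable letters list, a dict and the output string with two separate passes: a first pass builds the line->letter table by indexing a fixed alphabet string at len(mapping), then a join over the lines reads the finished table.
import Mathlib
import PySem

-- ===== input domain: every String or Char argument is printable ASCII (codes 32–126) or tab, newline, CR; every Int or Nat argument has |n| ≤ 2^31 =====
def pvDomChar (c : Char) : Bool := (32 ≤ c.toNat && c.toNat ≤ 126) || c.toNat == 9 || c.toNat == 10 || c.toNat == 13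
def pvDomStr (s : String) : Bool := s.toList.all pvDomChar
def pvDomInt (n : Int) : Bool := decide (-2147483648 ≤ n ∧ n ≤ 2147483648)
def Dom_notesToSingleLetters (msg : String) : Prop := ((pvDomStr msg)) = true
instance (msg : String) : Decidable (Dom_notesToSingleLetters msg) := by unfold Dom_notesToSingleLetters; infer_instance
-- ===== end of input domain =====

-- B replaces A's single interleaved loop (mutable letters list + dict + output) by two passes:
-- build the line->letter table first, then join the lines through the finished table (objective: simpler).


-- ===== PORT A =====
-- state: (result, letters, dict); none = the loop raised (letters.pop(0) on an empty list)
def pvAStep (st : Option (String × List Char × PySem.Dict String Char)) (line : String) :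
    Option (String × List Char × PySem.Dict String Char) :=
  match st with
  | none => none
  | some (result, letters, d) =>
    match d.get? line with
    | some c => some (result.push c, letters, d)           -- line in dict: result += dict[line]
    | none =>
      match letters with
      | [] => none                                          -- letters.pop(0): IndexError
      | letter :: rest => some (result.push letter, rest, d.insert line letter)

def notesToSingleLetters (msg : String) : String :=
  match (PySem.Str.splitlines msg).foldl pvAStep
      (some ("", "abcdefghijklmnopqrstuvwxyz".toList, PySem.Dict.empty)) with
  | some (result, _, _) => result
  | none => ""                                              -- unreachable under Pre_

-- ===== PORT B =====
def pvAlphabet : String := "abcdefghijklmnopqrstuvwxyz"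

-- first pass: mapping[line] = alphabet[len(mapping)] for unseen lines; none = IndexError on the 27th
def pvBuild (d? : Option (PySem.Dict String Char)) (line : String) :
    Option (PySem.Dict String Char) :=
  match d? with
  | none => none
  | some d =>
    if d.contains line then some d
    else
      match PySem.Str.pyGet? pvAlphabet (d.size : Int) with
      | none => none
      | some c => some (d.insert line c)

-- second pass: ''.join(mapping[line] for line in lines); none = KeyError (never fires on a built table)
def pvEmit (d : PySem.Dict String Char) (acc : Option String) (line : String) : Option String :=
  match acc, d.get? line with
  | some s, some c => some (s.push c)
  | _, _ => none

def notesToSingleLetters_alt (msg : String) : String :=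
  let lines := PySem.Str.splitlines msg
  match lines.foldl pvBuild (some PySem.Dict.empty) with
  | none => ""                                              -- unreachable under Pre_
  | some d =>
    match lines.foldl (pvEmit d) (some "") with
    | some r => r
    | none => ""                                            -- unreachable under Pre_

-- ===== PRECONDITION & SPEC =====
-- Pre_ excludes messages with more than 26 distinct lines, on which A raises IndexError (pop from the
-- exhausted letters list); B raises IndexError there too.
def Pre_notesToSingleLetters (msg : String) : Prop :=
  (PySem.List.dedup (PySem.Str.splitlines msg)).length ≤ 26
instance (msg : String) : Decidable (Pre_notesToSingleLetters msg) := by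
  unfold Pre_notesToSingleLetters; infer_instance

def pvWitness_notesToSingleLetters : String := "do\nre\nmi\ndo"

def Spec_notesToSingleLetters (msg : String) (out : String) : Prop := out = notesToSingleLetters_alt msg
instance (msg : String) (out : String) : Decidable (Spec_notesToSingleLetters msg out) := by
  unfold Spec_notesToSingleLetters; infer_instance

-- ===== CLAIM (what is proved, stated in full; the proofs are below) =====
def Claim_equal_notesToSingleLetters : Prop := ∀ (msg : String), Dom_notesToSingleLetters msg → Pre_notesToSingleLetters msg → Spec_notesToSingleLetters msg (notesToSingleLetters msg)

-- ===== LEMMAS AND PROOFS =====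

lemma foldl_build_none (ls : List String) : ls.foldl pvBuild none = none := by
  induction ls with
  | nil => rfl
  | cons l ls ih => simpa [pvBuild] using ih

-- the build pass only inserts fresh keys: existing bindings survive
lemma build_mono (ls : List String) (d D : PySem.Dict String Char)
    (h : ls.foldl pvBuild (some d) = some D) (k : String) (c : Char)
    (hk : d.get? k = some c) : D.get? k = some c := by
  induction ls generalizing d with
  | nil => cases h; exact hk
  | cons line ls ih =>
    simp only [List.foldl_cons, pvBuild] at h
    by_cases hc : d.contains line = true
    · rw [if_pos hc] at h
      exact ih d h hk
    · rw [if_neg hc] at h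
      cases hget : PySem.Str.pyGet? pvAlphabet (d.size : Int) with
      | none => rw [hget] at h; rw [foldl_build_none] at h; cases h
      | some c' =>
        rw [hget] at h
        refine ih (d.insert line c') h ?_
        have hne : k ≠ line := by
          intro he; subst he
          rw [PySem.Dict.contains_eq_isSome_get?, hk] at hc; simp at hc
        rw [PySem.Dict.get?_insert_of_ne d c' hne]; exact hk

-- build never fails when the total number of distinct keys stays within the alphabet
lemma build_total (ls : List String) (d : PySem.Dict String Char)
    (hnd : d.keys.Nodup)
    (hb : (PySem.Set.update d.keys ls).length ≤ 26) :
    ∃ D, ls.foldl pvBuild (some d) = some D := by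
  induction ls generalizing d with
  | nil => exact ⟨d, rfl⟩
  | cons line ls ih =>
    simp only [List.foldl_cons, pvBuild]
    by_cases hc : d.contains line = true
    · rw [if_pos hc]
      refine ih d hnd ?_
      have hmem : line ∈ d.keys := (PySem.Dict.contains_iff_mem_keys d line).mp hc
      rw [PySem.Set.update_cons, PySem.Set.add_of_mem hmem] at hb
      exact hb
    · rw [if_neg hc]
      have hmem : line ∉ d.keys := fun h => hc ((PySem.Dict.contains_iff_mem_keys d line).mpr h)
      rw [PySem.Set.update_cons, PySem.Set.add_of_not_mem hmem] at hb
      have hlen : (d.keys ++ [line]).length ≤ (PySem.Set.update (d.keys ++ [line]) ls).length := by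
        rw [PySem.Set.update_eq_append_filter]; simp
      have hsz : d.size < 26 := by
        have : d.keys.length + 1 ≤ 26 := le_trans (by simpa using hlen) hb
        simpa [PySem.Dict.size, PySem.Dict.keys] using this
      have hlt : d.size < pvAlphabet.toList.length := by
        simpa [pvAlphabet] using hsz
      have hget : PySem.Str.pyGet? pvAlphabet (d.size : Int) = some pvAlphabet.toList[d.size] := by
        rw [PySem.Str.pyGet?_natCast]; exact List.getElem?_eq_getElem hlt
      rw [hget]
      refine ih (d.insert line pvAlphabet.toList[d.size]) (PySem.Dict.nodup_keys_insert _ _ _ hnd) ?_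
      rw [PySem.Dict.keys_insert_of_not_contains _ _ (by simpa using hc)]
      exact hb

-- main invariant: A's interleaved loop from (res, alphabet[d.size:], d) lands on B's final table D,
-- and its output is exactly B's emit pass through D
lemma main_inv (ls : List String) (res : String) (d D : PySem.Dict String Char)
    (hD : ls.foldl pvBuild (some d) = some D) :
    ∃ r, ls.foldl (pvEmit D) (some res) = some r ∧
      ls.foldl pvAStep (some (res, pvAlphabet.toList.drop d.size, d))
        = some (r, pvAlphabet.toList.drop D.size, D) := by
  induction ls generalizing res d with
  | nil => cases hD; exact ⟨res, rfl, rfl⟩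
  | cons line ls ih =>
    simp only [List.foldl_cons, pvBuild] at hD
    simp only [List.foldl_cons]
    cases hget : d.get? line with
    | some c =>
      have hc : d.contains line = true := by
        rw [PySem.Dict.contains_eq_isSome_get?, hget]; rfl
      rw [if_pos hc] at hD
      obtain ⟨r, hr, ha⟩ := ih (res.push c) d hD
      have hDc : D.get? line = some c := build_mono ls d D hD line c hget
      refine ⟨r, ?_, ?_⟩
      · simpa [pvEmit, hDc] using hr
      · simpa [pvAStep, hget] using ha
    | none =>
      have hc : ¬ d.contains line = true := by
        rw [PySem.Dict.contains_eq_isSome_get?, hget]; simp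
      rw [if_neg hc] at hD
      cases halpha : PySem.Str.pyGet? pvAlphabet (d.size : Int) with
      | none => rw [halpha, foldl_build_none] at hD; cases hD
      | some c =>
        rw [halpha] at hD
        have hlt : d.size < pvAlphabet.toList.length := by
          by_contra hge
          rw [PySem.Str.pyGet?_natCast, List.getElem?_eq_none (by omega)] at halpha
          cases halpha
        have hcget : pvAlphabet.toList[d.size]? = some c := by
          rw [PySem.Str.pyGet?_natCast] at halpha; exact halpha
        have hdrop : pvAlphabet.toList.drop d.size = c :: pvAlphabet.toList.drop (d.size + 1) := by
          rw [List.drop_eq_getElem_cons hlt]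
          congr 1
          have := List.getElem?_eq_getElem hlt
          rw [this] at hcget; injection hcget
        obtain ⟨r, hr, ha⟩ := ih (res.push c) (d.insert line c) hD
        have hDc : D.get? line = some c :=
          build_mono ls _ D hD line c (PySem.Dict.get?_insert_self d line c)
        refine ⟨r, ?_, ?_⟩
        · simpa [pvEmit, hDc] using hr
        · have hsz : (d.insert line c).size = d.size + 1 := by
            rw [PySem.Dict.size_insert]
            simp [hc]
          rw [hdrop]
          simp only [pvAStep, hget]
          rw [hsz] at ha
          exact ha

-- ===== VERDICT (by name: the statement is the Claim_ definition above) =====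
theorem notesToSingleLetters_spec : Claim_equal_notesToSingleLetters := by
  intro msg _ hpre
  unfold Spec_notesToSingleLetters notesToSingleLetters notesToSingleLetters_alt
  set ls := PySem.Str.splitlines msg with hls
  have htot : ∃ D, ls.foldl pvBuild (some PySem.Dict.empty) = some D := by
    refine build_total ls PySem.Dict.empty ?_ ?_
    · simp [PySem.Dict.keys_empty]
    · unfold Pre_notesToSingleLetters at hpre
      rw [PySem.Dict.keys_empty, PySem.Set.update_nil_left, ← PySem.List.dedup_eq_ofList]
      exact hpre
  obtain ⟨D, hD⟩ := htot
  obtain ⟨r, hr, ha⟩ := main_inv ls "" PySem.Dict.empty D hD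
  have h0 : pvAlphabet.toList.drop (PySem.Dict.empty : PySem.Dict String Char).size = "abcdefghijklmnopqrstuvwxyz".toList := rfl
  rw [h0] at ha
  simp only [hD, ha, hr]
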